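-- pv_equiv track=rewrite | github.com/TomoBossi/Introduccion-a-la-Programacion | guia08.py | tiene3vocalesDistintas
-- ===== SOURCE A (Python) =====
-- def pertenece(s: list[int], e: int) -> bool:
--     return e in s
--
-- def tiene3vocalesDistintas(s: str) -> bool:
--     vocales: list[str] = ["a", "e", "i", "o", "u"]
--     vocalesVistas: list[str] = []
--     i: int = 0
--     while i < len(s):
--         if pertenece(vocales, s[i]) and not pertenece(vocalesVistas, s[i]):
--             vocalesVistas.append(s[i])
--         i += 1
--     return len(vocalesVistas) >= 3
-- ===== SOURCE B (Python) =====
-- def tiene3vocalesDistintas(s: str) -> bool: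
--     return sum(1 for v in "aeiou" if v in s) >= 3
-- ===== Notes on version B (the rewrite author's own statement) =====
-- stated objective: faster
-- what changed: Instead of scanning the string character by character while maintaining a deduplicated seen-vowels list, B loops over the fixed five vowels and counts how many occur in the string via one membership test each.
import Mathlib
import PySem

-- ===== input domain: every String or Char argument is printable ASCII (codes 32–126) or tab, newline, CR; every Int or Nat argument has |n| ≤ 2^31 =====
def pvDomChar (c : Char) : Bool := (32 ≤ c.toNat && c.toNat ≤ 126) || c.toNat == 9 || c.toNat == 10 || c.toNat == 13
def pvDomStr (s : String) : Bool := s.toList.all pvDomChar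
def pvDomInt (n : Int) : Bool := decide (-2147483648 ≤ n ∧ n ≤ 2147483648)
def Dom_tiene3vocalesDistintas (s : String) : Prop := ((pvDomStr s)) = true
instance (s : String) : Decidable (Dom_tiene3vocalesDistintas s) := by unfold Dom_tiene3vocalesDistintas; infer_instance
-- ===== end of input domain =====

-- B replaces A's character scan with a seen-list by an idiomatic count, over the five vowels, of membership in s.

-- ===== PORT A =====
def pertenece (s : List Char) (e : Char) : Bool := s.contains e

def vocalesA : List Char := ['a', 'e', 'i', 'o', 'u']

-- the while loop over i, carrying vocalesVistas
def loopA : List Char → List Char → List Char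
  | [], vistas => vistas
  | c :: rest, vistas =>
      if pertenece vocalesA c && !(pertenece vistas c) then
        loopA rest (vistas ++ [c])
      else
        loopA rest vistas

def tiene3vocalesDistintas (s : String) : Bool :=
  decide (3 ≤ (loopA s.toList []).length)

-- ===== PORT B =====
def tiene3vocalesDistintas_alt (s : String) : Bool :=
  decide (3 ≤ (['a', 'e', 'i', 'o', 'u'].filter (fun v => s.toList.contains v)).length)

-- ===== PRECONDITION & SPEC =====
def Spec_tiene3vocalesDistintas (s : String) (out : Bool) : Prop := out = tiene3vocalesDistintas_alt s
instance (s : String) (out : Bool) : Decidable (Spec_tiene3vocalesDistintas s out) := by unfold Spec_tiene3vocalesDistintas; infer_instance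

-- ===== CLAIM (what is proved, stated in full; the proofs are below) =====
def Claim_equal_tiene3vocalesDistintas : Prop := ∀ (s : String), Dom_tiene3vocalesDistintas s → Spec_tiene3vocalesDistintas s (tiene3vocalesDistintas s)

-- ===== LEMMAS AND PROOFS =====
theorem mem_loopA (cs vistas : List Char) (c : Char) :
    c ∈ loopA cs vistas ↔ c ∈ vistas ∨ (c ∈ vocalesA ∧ c ∈ cs) := by
  induction cs generalizing vistas with
  | nil => simp [loopA]
  | cons c' rest ih =>
    simp only [loopA, pertenece]
    split
    · rename_i h
      simp only [Bool.and_eq_true, Bool.not_eq_true', List.contains_eq_mem,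
        decide_eq_true_eq, decide_eq_false_iff_not] at h
      rw [ih]
      simp only [List.mem_append, List.mem_cons]
      by_cases hc : c = c'
      · subst hc; simp [h.1]
      · simp [hc]
    · rename_i h
      simp only [Bool.and_eq_true, Bool.not_eq_true', List.contains_eq_mem,
        decide_eq_true_eq, decide_eq_false_iff_not, not_and, not_not] at h
      rw [ih]
      simp only [List.mem_cons]
      by_cases hc : c = c'
      · subst hc; tauto
      · tauto

theorem nodup_loopA (cs vistas : List Char) (hv : vistas.Nodup) :
    (loopA cs vistas).Nodup := by
  induction cs generalizing vistas with
  | nil => simpa [loopA]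
  | cons c' rest ih =>
    simp only [loopA]
    split
    · rename_i h
      simp only [Bool.and_eq_true, Bool.not_eq_true', List.contains_eq_mem, pertenece,
        decide_eq_true_eq, decide_eq_false_iff_not] at h
      refine ih _ ?_
      rw [List.nodup_append]
      refine ⟨hv, List.nodup_singleton _, ?_⟩
      intro a ha b hb
      simp only [List.mem_singleton] at hb
      subst hb
      exact fun heq => h.2 (heq ▸ ha)
    · exact ih _ hv

theorem loopA_perm_filter (s : String) :
    (loopA s.toList []).Perm (vocalesA.filter (fun v => s.toList.contains v)) := by
  rw [List.perm_ext_iff_of_nodup (nodup_loopA _ _ (by simp))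
      (List.Nodup.filter _ (by decide))]
  intro c
  rw [mem_loopA]
  simp [List.mem_filter]

-- ===== VERDICT (by name: the statement is the Claim_ definition above) =====
theorem tiene3vocalesDistintas_spec : Claim_equal_tiene3vocalesDistintas := by
  intro s _
  unfold Spec_tiene3vocalesDistintas tiene3vocalesDistintas tiene3vocalesDistintas_alt
  rw [show (['a', 'e', 'i', 'o', 'u'] : List Char) = vocalesA from rfl,
    (loopA_perm_filter s).length_eq]
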